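-- pv_equiv track=rewrite | github.com/Jakubwlodarczyk/python-lightweight-erp-project-404 | crm/crm.py | get_longest_name_id
-- ===== SOURCE A (Python) =====
-- def get_longest_name_id(table):
--     result_list = []
--     for customer in table:
--         result_list.append([len(customer[1]),customer[0],customer[1]])
--
--     max_length = (max(result_list))[0]
--
--     result = list(filter(lambda x: x[0] == max_length, result_list))
--     result = min(result, key = lambda x: x[2])
--
--     return result[1]
-- ===== SOURCE B (Python) =====
-- def get_longest_name_id(table):
--     best_id = None
--     best_len = -1
--     best_name = ""
--     for customer in table:
--         name = customer[1]
--         n = len(name)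
--         if n > best_len or (n == best_len and name < best_name):
--             best_id, best_len, best_name = customer[0], n, name
--     if best_id is None:
--         raise ValueError("max() arg is an empty sequence")
--     return best_id
-- ===== Notes on version B (the rewrite author's own statement) =====
-- stated objective: simpler
-- what changed: A builds a parallel list of [len,id,name] triples, takes max() over it, filters the triples with maximal length and takes min() by name; B is a single linear scan keeping (best_id, best_len, best_name) and updating on strictly-longer or equal-length-and-strictly-smaller name.
import Mathlib
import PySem

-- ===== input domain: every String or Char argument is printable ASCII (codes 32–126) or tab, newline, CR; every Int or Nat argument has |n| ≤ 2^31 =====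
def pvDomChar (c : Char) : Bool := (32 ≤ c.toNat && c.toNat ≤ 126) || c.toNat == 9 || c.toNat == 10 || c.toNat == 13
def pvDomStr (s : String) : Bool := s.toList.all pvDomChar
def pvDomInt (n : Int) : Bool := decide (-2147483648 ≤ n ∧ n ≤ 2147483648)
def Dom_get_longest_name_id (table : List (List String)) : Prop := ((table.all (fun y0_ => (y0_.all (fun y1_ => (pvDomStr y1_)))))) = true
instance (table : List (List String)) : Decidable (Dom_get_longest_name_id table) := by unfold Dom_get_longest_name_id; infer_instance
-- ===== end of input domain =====

-- B replaces A's build-triples / max / filter / min pipeline by a single scan keeping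
-- (best_id, best_len, best_name); equal return values on Pre_ (nonempty table, rows with ≥ 2 fields).

-- ===== PORT A =====
-- Python's `max` over the [len, id, name] lists: first maximal element under Python's
-- elementwise (lexicographic) list comparison — hand port, exact on these [int, str, str] rows.
def pvTripLt (x y : Int × String × String) : Bool :=
  x.1 < y.1 || (x.1 == y.1 && (x.2.1 < y.2.1 || (x.2.1 == y.2.1 && x.2.2 < y.2.2)))

def pvMax3 : List (Int × String × String) → Option (Int × String × String)
  | [] => none
  | x :: t => some (t.foldl (fun b y => if pvTripLt b y then y else b) x)

def get_longest_name_id (table : List (List String)) : String :=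
  let result_list : List (Int × String × String) :=
    table.foldl (fun acc customer =>
      acc ++ [(PySem.Str.len ((PySem.List.pyGet? customer 1).getD ""),
               (PySem.List.pyGet? customer 0).getD "",
               (PySem.List.pyGet? customer 1).getD "")]) []
  match pvMax3 result_list with
  | none => ""   -- max([]) raises ValueError; excluded by Pre_
  | some mx =>
    let max_length := mx.1
    let result := result_list.filter (fun x => x.1 == max_length)
    match PySem.List.min? result (fun x => x.2.2) with
    | none => ""   -- unreachable: the filtered list contains the max element
    | some r => r.2.1

-- ===== PORT B =====
def get_longest_name_id_alt (table : List (List String)) : String :=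
  let st := table.foldl (fun st customer =>
      let name := (PySem.List.pyGet? customer 1).getD ""
      let n := PySem.Str.len name
      if n > st.2.1 ∨ (n = st.2.1 ∧ name < st.2.2)
      then ((some ((PySem.List.pyGet? customer 0).getD "") : Option String), n, name)
      else st)
    ((none : Option String), (-1 : Int), "")
  match st.1 with
  | none => ""   -- Source B raises ValueError here (empty table); excluded by Pre_
  | some i => i

-- ===== PRECONDITION & SPEC =====
-- Exactly where Python A returns: on an empty table A raises ValueError (max of []),
-- and on a row with fewer than 2 fields A raises IndexError (customer[1]).
def Pre_get_longest_name_id (table : List (List String)) : Prop :=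
  table ≠ [] ∧ ∀ row ∈ table, 2 ≤ row.length
instance (table : List (List String)) : Decidable (Pre_get_longest_name_id table) := by
  unfold Pre_get_longest_name_id; infer_instance

def pvWitness_get_longest_name_id : List (List String) := [["1", "Alice"], ["2", "Bo"]]

def Spec_get_longest_name_id (table : List (List String)) (out : String) : Prop := out = get_longest_name_id_alt table
instance (table : List (List String)) (out : String) : Decidable (Spec_get_longest_name_id table out) := by unfold Spec_get_longest_name_id; infer_instance

-- ===== CLAIM (what is proved, stated in full; the proofs are below) =====
def Claim_equal_get_longest_name_id : Prop := ∀ (table : List (List String)), Dom_get_longest_name_id table → Pre_get_longest_name_id table → Spec_get_longest_name_id table (get_longest_name_id table)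

-- ===== LEMMAS AND PROOFS =====

-- the triple A builds (and B inspects) for one customer row
def pvF (c : List String) : Int × String × String :=
  (PySem.Str.len ((PySem.List.pyGet? c 1).getD ""),
   (PySem.List.pyGet? c 0).getD "",
   (PySem.List.pyGet? c 1).getD "")

-- B's update step, expressed on the triples (len, id, name)
def pvG (b y : Int × String × String) : Int × String × String :=
  if y.1 > b.1 ∨ (y.1 = b.1 ∧ y.2.2 < b.2.2) then y else b

lemma pvG_fst (b y : Int × String × String) : (pvG b y).1 = max b.1 y.1 := by
  unfold pvG
  split_ifs with h
  · rcases h with h | ⟨h, _⟩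
    · exact (max_eq_right h.le).symm
    · rw [h]; simp
  · rw [not_or] at h
    exact (max_eq_left (not_lt.mp h.1)).symm

lemma pvTripLt_fst (x y : Int × String × String) :
    (if pvTripLt x y then y else x).1 = max x.1 y.1 := by
  rcases lt_trichotomy x.1 y.1 with h | h | h
  · have : pvTripLt x y = true := by simp [pvTripLt, h]
    rw [if_pos this, max_eq_right h.le]
  · split_ifs <;> omega
  · have : pvTripLt x y = false := by simp [pvTripLt, not_lt.mpr h.le, h.ne']
    rw [if_neg (by simp [this]), max_eq_left h.le]

-- the first component of Python's max over the triples is the running max of the lengths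
lemma pvMaxFold_fst (t : List (Int × String × String)) :
    ∀ x, (t.foldl (fun b y => if pvTripLt b y then y else b) x).1
      = t.foldl (fun m y => max m y.1) x.1 := by
  induction t with
  | nil => intro x; rfl
  | cons y t ih =>
    intro x
    simp only [List.foldl_cons]
    rw [ih, pvTripLt_fst]

-- dropping an element that is ≥ the head (in key) right after the head keeps the first min
lemma pvMin?_drop_second {α κ : Type} [LinearOrder κ] (key : α → κ) (x y : α) (F : List α)
    (h : key x ≤ key y) :
    PySem.List.min? (x :: y :: F) key = PySem.List.min? (x :: F) key := by
  simp only [PySem.List.min?, List.foldl_cons]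
  rw [if_neg (not_lt.mpr h)]

-- a strictly smaller next element makes the head irrelevant for the first min
lemma pvMin?_drop_head {α κ : Type} [LinearOrder κ] (key : α → κ) (x y : α) (F : List α)
    (h : key y < key x) :
    PySem.List.min? (x :: y :: F) key = PySem.List.min? (y :: F) key := by
  simp only [PySem.List.min?, List.foldl_cons]
  rw [if_pos h]

-- MAIN: A's filter-by-max-length / first-min-name pipeline equals B's single fold
lemma pvMain (t : List (Int × String × String)) :
    ∀ x, PySem.List.min?
        ((x :: t).filter (fun z => z.1 == t.foldl (fun m y => max m y.1) x.1))
        (fun z => z.2.2)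
      = some (t.foldl pvG x) := by
  induction t with
  | nil =>
    intro x
    simp [PySem.List.min?]
  | cons y t ih =>
    intro x
    simp only [List.foldl_cons]
    have hM := (PySem.List.le_foldl_max_int t (fun z => z.1) (max x.1 y.1)).1
    -- reduce to: the two filtered lists have the same first min
    have hgoal :
        PySem.List.min?
          ((x :: y :: t).filter (fun z => z.1 == t.foldl (fun m y => max m y.1) (max x.1 y.1)))
          (fun z => z.2.2)
        = PySem.List.min?
          ((pvG x y :: t).filter (fun z => z.1 == t.foldl (fun m y => max m y.1) (max x.1 y.1)))
          (fun z => z.2.2) := by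
      set M := t.foldl (fun m y => max m y.1) (max x.1 y.1) with hMdef
      have hxy : max x.1 y.1 ≤ M := hM
      rcases lt_trichotomy x.1 y.1 with h | h | h
      · -- x can never reach the max length
        have hg : pvG x y = y := if_pos (Or.inl h)
        have hxM : (x.1 == M) = false := by
          have : y.1 ≤ max x.1 y.1 := le_max_right _ _
          simp only [beq_eq_false_iff_ne]; omega
        rw [hg]
        simp only [List.filter_cons, hxM]
        simp
      · -- equal lengths: compare names
        by_cases hn : y.2.2 < x.2.2
        · have hg : pvG x y = y := if_pos (Or.inr ⟨h.symm, hn⟩)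
          rw [hg]
          by_cases hxM : x.1 = M
          · have hyM : y.1 = M := h ▸ hxM
            simp only [List.filter_cons, beq_iff_eq, hxM, hyM]
            exact pvMin?_drop_head (fun z => z.2.2) x y _ hn
          · have hyM : ¬ (y.1 = M) := h ▸ hxM
            simp only [List.filter_cons, beq_iff_eq, if_neg hxM, if_neg hyM]
        · have hg : pvG x y = x := by
            apply if_neg
            rw [not_or]
            exact ⟨by omega, fun hc => hn hc.2⟩
          rw [hg]
          by_cases hxM : x.1 = M
          · have hyM : y.1 = M := h ▸ hxM
            simp only [List.filter_cons, beq_iff_eq, hxM, hyM]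
            exact pvMin?_drop_second (fun z => z.2.2) x y _ (not_lt.mp hn)
          · have hyM : ¬ (y.1 = M) := h ▸ hxM
            simp only [List.filter_cons, beq_iff_eq, if_neg hxM, if_neg hyM]
      · -- y can never reach the max length
        have hg : pvG x y = x := by
          apply if_neg
          rw [not_or]
          exact ⟨by omega, fun hc => absurd hc.1 (by omega)⟩
        have hyM : (y.1 == M) = false := by
          have : x.1 ≤ max x.1 y.1 := le_max_left _ _
          simp only [beq_eq_false_iff_ne]; omega
        rw [hg]
        simp only [List.filter_cons, hyM]
        simp
    rw [hgoal]
    have := ih (pvG x y)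
    rw [pvG_fst] at this
    exact this

-- A on a nonempty table computes the fold of pvG over the triples, then takes the id
lemma pvA_eq (c : List String) (cs : List (List String)) :
    get_longest_name_id (c :: cs) = ((cs.map pvF).foldl pvG (pvF c)).2.1 := by
  have hmap : (c :: cs).foldl (fun acc customer =>
      acc ++ [(PySem.Str.len ((PySem.List.pyGet? customer 1).getD ""),
               (PySem.List.pyGet? customer 0).getD "",
               (PySem.List.pyGet? customer 1).getD "")]) []
      = (c :: cs).map pvF :=
    (PySem.List.foldl_append_singleton_eq_map pvF (c :: cs) []).trans (List.nil_append _)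
  unfold get_longest_name_id
  rw [hmap]
  simp only [List.map_cons, pvMax3]
  rw [pvMaxFold_fst, pvMain (cs.map pvF) (pvF c)]

-- B's loop, once the state holds a real best triple, tracks the pvG fold
lemma pvB_fold (cs : List (List String)) :
    ∀ z : Int × String × String,
      cs.foldl (fun st customer =>
        if PySem.Str.len ((PySem.List.pyGet? customer 1).getD "") > st.2.1 ∨
           (PySem.Str.len ((PySem.List.pyGet? customer 1).getD "") = st.2.1 ∧
            (PySem.List.pyGet? customer 1).getD "" < st.2.2)
        then ((some ((PySem.List.pyGet? customer 0).getD "") : Option String),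
              PySem.Str.len ((PySem.List.pyGet? customer 1).getD ""),
              (PySem.List.pyGet? customer 1).getD "")
        else st) ((some z.2.1 : Option String), z.1, z.2.2)
      = (some ((cs.map pvF).foldl pvG z).2.1, ((cs.map pvF).foldl pvG z).1,
         ((cs.map pvF).foldl pvG z).2.2) := by
  induction cs with
  | nil => intro z; rfl
  | cons c cs ih =>
    intro z
    simp only [List.foldl_cons, List.map_cons]
    by_cases h : PySem.Str.len ((PySem.List.pyGet? c 1).getD "") > z.1 ∨
        (PySem.Str.len ((PySem.List.pyGet? c 1).getD "") = z.1 ∧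
         (PySem.List.pyGet? c 1).getD "" < z.2.2)
    · rw [if_pos h, show pvG z (pvF c) = pvF c from if_pos (by simpa [pvF] using h),
        show ((some ((PySem.List.pyGet? c 0).getD "") : Option String),
              PySem.Str.len ((PySem.List.pyGet? c 1).getD ""),
              (PySem.List.pyGet? c 1).getD "")
          = ((some (pvF c).2.1 : Option String), (pvF c).1, (pvF c).2.2) from rfl]
      exact ih (pvF c)
    · rw [if_neg h, show pvG z (pvF c) = z from if_neg (by simpa [pvF] using h)]
      exact ih z

lemma pvB_eq (c : List String) (cs : List (List String)) :
    get_longest_name_id_alt (c :: cs) = ((cs.map pvF).foldl pvG (pvF c)).2.1 := by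
  unfold get_longest_name_id_alt
  simp only [List.foldl_cons]
  have h0 : (0 : Int) ≤ PySem.Str.len ((PySem.List.pyGet? c 1).getD "") := by
    simp [PySem.Str.len_eq]
  rw [if_pos (Or.inl (show PySem.Str.len ((PySem.List.pyGet? c 1).getD "") > (-1 : Int) by omega)),
    show ((some ((PySem.List.pyGet? c 0).getD "") : Option String),
          PySem.Str.len ((PySem.List.pyGet? c 1).getD ""),
          (PySem.List.pyGet? c 1).getD "")
      = ((some (pvF c).2.1 : Option String), (pvF c).1, (pvF c).2.2) from rfl,
    pvB_fold cs (pvF c)]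

-- ===== VERDICT (by name: the statement is the Claim_ definition above) =====
theorem get_longest_name_id_spec : Claim_equal_get_longest_name_id := by
  intro table _ hpre
  unfold Spec_get_longest_name_id
  obtain ⟨hne, -⟩ := hpre
  cases table with
  | nil => exact absurd rfl hne
  | cons c cs => rw [pvA_eq, pvB_eq]
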